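-- pv_equiv track=rewrite | github.com/tammuoichanhoa/crawl_lastest_news | crawler/article.py | _truncate_tag_list
-- ===== SOURCE A (Python) =====
-- from typing import Any, Callable, Iterable, List, Optional, Sequence, Tuple
--
-- def _truncate_tag_list(value: str | None, max_length: int) -> str | None:
--     if not value:
--         return None
--     if len(value) <= max_length:
--         return value
--
--     parts = [part.strip() for part in value.split(",") if part.strip()]
--     if not parts:
--         return value[:max_length]
--
--     truncated: List[str] = []
--     current_length = 0
--     for part in parts:
--         addition = len(part) if not truncated else len(part) + 1  # include comma
--         if current_length + addition > max_length:
--             break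
--         truncated.append(part)
--         current_length += addition
--
--     if not truncated:
--         return value[:max_length]
--     return ",".join(truncated)
-- ===== SOURCE B (Python) =====
-- def _truncate_tag_list(value, max_length):
--     if not value:
--         return None
--     if len(value) <= max_length:
--         return value
--     parts = [part.strip() for part in value.split(",") if part.strip()]
--     if not parts:
--         return value[:max_length]
--     k = len(parts)
--     while k > 0 and len(",".join(parts[:k])) > max_length:
--         k -= 1
--     if k == 0:
--         return value[:max_length]
--     return ",".join(parts[:k])
-- ===== Notes on version B (the rewrite author's own statement) =====
-- stated objective: alternative
-- what changed: Replaces A's forward greedy loop with its running current_length/comma accumulator by a backward search: start with all parts and shrink the prefix count k from len(parts) while the joined prefix is too long, then join parts[:k]; guards and fallbacks unchanged.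
import Mathlib
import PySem

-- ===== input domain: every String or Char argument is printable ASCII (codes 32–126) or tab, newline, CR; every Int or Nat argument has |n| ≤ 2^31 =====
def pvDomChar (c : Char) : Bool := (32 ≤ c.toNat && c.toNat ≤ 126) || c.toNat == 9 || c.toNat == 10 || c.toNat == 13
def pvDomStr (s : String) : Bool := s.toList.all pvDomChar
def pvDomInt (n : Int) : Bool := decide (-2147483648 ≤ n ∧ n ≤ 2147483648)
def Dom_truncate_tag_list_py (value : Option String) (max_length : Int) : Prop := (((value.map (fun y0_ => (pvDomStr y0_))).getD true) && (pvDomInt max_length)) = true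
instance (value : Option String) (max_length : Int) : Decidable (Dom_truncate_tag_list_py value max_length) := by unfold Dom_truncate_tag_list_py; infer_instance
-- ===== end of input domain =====

-- B replaces A's forward greedy loop with running length accumulator by a backward shrink
-- of the prefix count over the joined parts (alternative decomposition, not faster).


-- ===== PORT A =====
-- A's for-loop over parts with the truncated list, current_length accumulator and break
def ttlALoop (max_length : Int) : List (List Char) → List (List Char) → Int → List (List Char)
  | [], trunc, _ => trunc
  | p :: rest, trunc, cur =>
    let addition : Int := if trunc = [] then (p.length : Int) else (p.length : Int) + 1
    if max_length < cur + addition then trunc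
    else ttlALoop max_length rest (trunc ++ [p]) (cur + addition)

def truncate_tag_list_py (value : Option String) (max_length : Int) : Option String :=
  match value with
  | none => none
  | some v =>
    if v.toList = [] then none
    else if (v.toList.length : Int) ≤ max_length then some v
    else
      let parts := ((PySem.Chars.splitOn v.toList [',']).map PySem.Chars.strip).filter (· ≠ [])
      if parts = [] then some (String.ofList (PySem.Chars.slice v.toList none (some max_length)))
      else
        let truncated := ttlALoop max_length parts [] 0
        if truncated = [] then some (String.ofList (PySem.Chars.slice v.toList none (some max_length)))
        else some (String.ofList (PySem.Chars.join [','] truncated))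

-- ===== PORT B =====
-- B's while loop: shrink k from len(parts) while ",".join(parts[:k]) is too long
def ttlBShrink (parts : List (List Char)) (max_length : Int) : Nat → Nat
  | 0 => 0
  | k + 1 =>
    if max_length < ((PySem.Chars.join [','] (parts.take (k + 1))).length : Int) then
      ttlBShrink parts max_length k
    else k + 1

def truncate_tag_list_py_alt (value : Option String) (max_length : Int) : Option String :=
  match value with
  | none => none
  | some v =>
    if v.toList = [] then none
    else if (v.toList.length : Int) ≤ max_length then some v
    else
      let parts := ((PySem.Chars.splitOn v.toList [',']).map PySem.Chars.strip).filter (· ≠ [])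
      if parts = [] then some (String.ofList (PySem.Chars.slice v.toList none (some max_length)))
      else
        let k := ttlBShrink parts max_length parts.length
        if k = 0 then some (String.ofList (PySem.Chars.slice v.toList none (some max_length)))
        else some (String.ofList (PySem.Chars.join [','] (parts.take k)))

-- ===== PRECONDITION & SPEC =====
def Spec_truncate_tag_list_py (value : Option String) (max_length : Int) (out : Option String) : Prop := out = truncate_tag_list_py_alt value max_length
instance (value : Option String) (max_length : Int) (out : Option String) : Decidable (Spec_truncate_tag_list_py value max_length out) := by unfold Spec_truncate_tag_list_py; infer_instance

-- ===== CLAIM (what is proved, stated in full; the proofs are below) =====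
def Claim_equal_truncate_tag_list_py : Prop := ∀ (value : Option String) (max_length : Int), Dom_truncate_tag_list_py value max_length → Spec_truncate_tag_list_py value max_length (truncate_tag_list_py value max_length)

-- ===== LEMMAS AND PROOFS =====

theorem ttl_getElem_of_drop (parts : List (List Char)) (k : Nat) (p : List Char)
    (h : parts.drop k = p :: (parts.drop (k + 1))) (hk : k < parts.length) : parts[k]'hk = p := by
  have hh : (parts.drop k).head? = some p := by rw [h]; rfl
  rw [List.head?_drop] at hh
  simpa [List.getElem?_eq_getElem hk] using hh

-- length of ",".join(parts[:k]) as an Int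
def ttlL (parts : List (List Char)) (k : Nat) : Int :=
  ((PySem.Chars.join [','] (parts.take k)).length : Int)

theorem ttl_join_append_len (xs : List (List Char)) (y : List Char) :
    (PySem.Chars.join [','] (xs ++ [y])).length
      = (PySem.Chars.join [','] xs).length + (if xs = [] then 0 else 1) + y.length := by
  induction xs with
  | nil => simp [PySem.Chars.join, List.intercalate]
  | cons a t ih =>
    cases t with
    | nil => simp [PySem.Chars.join, List.intercalate]; omega
    | cons b r =>
      simp only [List.cons_append, PySem.Chars.join_cons_cons, List.length_append] at *
      simp_all
      omega

theorem ttlL_step (parts : List (List Char)) (k : Nat) (p : List Char)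
    (h : parts.drop k = p :: (parts.drop (k + 1))) (hk : k < parts.length) :
    ttlL parts (k + 1) = ttlL parts k + (if k = 0 then (p.length : Int) else (p.length : Int) + 1) := by
  have hp : parts[k]'hk = p := ttl_getElem_of_drop parts k p h hk
  have htake : parts.take (k + 1) = parts.take k ++ [p] := by
    rw [List.take_add_one]
    simp [List.getElem?_eq_getElem hk, hp]
  have hemp : (parts.take k = []) ↔ k = 0 := by
    constructor
    · intro he
      by_contra hne
      have : (parts.take k).length = min k parts.length := by simp
      rw [he] at this
      simp at this
      omega
    · intro he; simp [he]
  unfold ttlL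
  rw [htake, ttl_join_append_len]
  by_cases h0 : k = 0
  · simp [h0, hemp.mpr h0]
  · have hne : ¬ (parts.take k = []) := fun he => h0 (hemp.mp he)
    simp [h0, hne]
    push_cast
    ring

theorem ttlL_mono (parts : List (List Char)) (i j : Nat) (hij : i ≤ j) (hj : j ≤ parts.length) :
    ttlL parts i ≤ ttlL parts j := by
  induction j with
  | zero =>
    have : i = 0 := by omega
    simp [this]
  | succ k ih =>
    rcases Nat.lt_or_ge i (k + 1) with h | h
    · have hi : i ≤ k := by omega
      have hk : k < parts.length := by omega
      have hdrop : parts.drop k = (parts[k]'hk) :: parts.drop (k + 1) := by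
        rw [List.drop_eq_getElem_cons hk]
      have hstep := ttlL_step parts k (parts[k]'hk) hdrop hk
      have hle := ih hi (by omega)
      rw [hstep]
      split <;> omega
    · have : i = k + 1 := by omega
      simp [this]

-- characterisation of B's shrink loop
theorem ttlBShrink_spec (parts : List (List Char)) (max_length : Int) (k : Nat) :
    ttlBShrink parts max_length k ≤ k ∧
    (ttlBShrink parts max_length k = 0 ∨ ttlL parts (ttlBShrink parts max_length k) ≤ max_length) ∧
    (∀ j, ttlBShrink parts max_length k < j → j ≤ k → max_length < ttlL parts j) := by
  induction k with
  | zero => refine ⟨le_refl _, Or.inl rfl, ?_⟩; intro j h1 h2; omega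
  | succ m ih =>
    unfold ttlBShrink
    by_cases hc : max_length < ((PySem.Chars.join [','] (parts.take (m + 1))).length : Int)
    · rw [if_pos hc]
      refine ⟨by omega, ih.2.1, ?_⟩
      intro j h1 h2
      rcases Nat.lt_or_ge j (m + 1) with h | h
      · exact ih.2.2 j h1 (by omega)
      · have : j = m + 1 := by omega
        simpa [this, ttlL] using hc
    · rw [if_neg hc]
      refine ⟨le_refl _, Or.inr ?_, ?_⟩
      · simpa [ttlL] using not_lt.mp hc
      · intro j h1 h2; omega

-- A's loop, started at prefix m with the matching accumulator, lands on parts.take K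
theorem ttlALoop_spec (parts : List (List Char)) (max_length : Int) :
    ∀ (ps : List (List Char)) (m : Nat), ps = parts.drop m → m ≤ parts.length →
      m ≤ ttlBShrink parts max_length parts.length →
      ttlALoop max_length ps (parts.take m) (ttlL parts m)
        = parts.take (ttlBShrink parts max_length parts.length) := by
  intro ps
  induction ps with
  | nil =>
    intro m hdrop hm hK
    have hmn : m = parts.length := by
      have := congrArg List.length hdrop
      simp at this
      omega
    have hKle := (ttlBShrink_spec parts max_length parts.length).1
    have : m = ttlBShrink parts max_length parts.length := by omega
    simp [ttlALoop, this]
  | cons p rest ih =>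
    intro m hdrop hm hK
    have hlen := congrArg List.length hdrop
    simp at hlen
    have hmn : m < parts.length := by omega
    have hrest : rest = parts.drop (m + 1) := by
      have := congrArg List.tail hdrop
      simpa using this
    have hdrop' : parts.drop m = p :: parts.drop (m + 1) := by rw [← hrest, ← hdrop]
    have hstep := ttlL_step parts m p hdrop' hmn
    have hemp : (parts.take m = []) ↔ m = 0 := by
      constructor
      · intro he
        by_contra hne
        have : (parts.take m).length = min m parts.length := by simp
        rw [he] at this
        simp at this
        omega
      · intro he; simp [he]
    set K := ttlBShrink parts max_length parts.length with hKdef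
    have hKspec := ttlBShrink_spec parts max_length parts.length
    unfold ttlALoop
    have hadd : (if parts.take m = [] then ((p.length : Int)) else ((p.length : Int) + 1))
        = (if m = 0 then ((p.length : Int)) else ((p.length : Int) + 1)) := by
      by_cases h0 : m = 0
      · rw [if_pos (hemp.mpr h0), if_pos h0]
      · have hne : ¬ (parts.take m = []) := fun he => h0 (hemp.mp he)
        rw [if_neg hne, if_neg h0]
    simp only [hadd]
    by_cases hc : max_length < ttlL parts m + (if m = 0 then ((p.length : Int)) else ((p.length : Int) + 1))
    · rw [if_pos hc]
      -- break: show K = m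
      have hfail : max_length < ttlL parts (m + 1) := by rw [hstep]; exact hc
      have : K = m := by
        by_contra hne
        have hmK : m + 1 ≤ K := by omega
        have hK0 : K ≠ 0 := by omega
        have hfit : ttlL parts K ≤ max_length := by
          rcases hKspec.2.1 with h | h
          · exact absurd h hK0
          · exact h
        have := ttlL_mono parts (m + 1) K hmK hKspec.1
        omega
      rw [this]
    · rw [if_neg hc]
      have hfit : ¬ (max_length < ttlL parts (m + 1)) := by rw [hstep]; exact hc
      have hm1K : m + 1 ≤ K := by
        by_contra hlt
        exact hfit (hKspec.2.2 (m + 1) (by omega) (by omega))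
      have htake : parts.take m ++ [p] = parts.take (m + 1) := by
        have hp : parts[m]'hmn = p := ttl_getElem_of_drop parts m p hdrop' hmn
        rw [List.take_add_one]
        simp [List.getElem?_eq_getElem hmn, hp]
      rw [htake, ← hstep]
      exact ih (m + 1) hrest (by omega) hm1K

theorem ttl_core (parts : List (List Char)) (max_length : Int) :
    ttlALoop max_length parts [] 0 = parts.take (ttlBShrink parts max_length parts.length) := by
  have h0 : ttlL parts 0 = 0 := by simp [ttlL, PySem.Chars.join]
  have := ttlALoop_spec parts max_length parts 0 (by simp) (by omega) (by omega)
  simpa [h0] using this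

-- ===== VERDICT (by name: the statement is the Claim_ definition above) =====
theorem truncate_tag_list_py_spec : Claim_equal_truncate_tag_list_py := by
  intro value max_length _
  unfold Spec_truncate_tag_list_py truncate_tag_list_py truncate_tag_list_py_alt
  match value with
  | none => rfl
  | some v =>
    simp only
    by_cases h1 : v.toList = []
    · simp [h1]
    · rw [if_neg h1, if_neg h1]
      by_cases h2 : (v.toList.length : Int) ≤ max_length
      · rw [if_pos h2, if_pos h2]
      · rw [if_neg h2, if_neg h2]
        set parts := ((PySem.Chars.splitOn v.toList [',']).map PySem.Chars.strip).filter (· ≠ []) with hparts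
        by_cases h3 : parts = []
        · simp [h3]
        · rw [if_neg h3, if_neg h3]
          simp only [ttl_core parts max_length]
          set K := ttlBShrink parts max_length parts.length with hK
          by_cases h4 : K = 0
          · simp [h4]
          · have htne : parts.take K ≠ [] := by
              intro he
              have hl : min K parts.length = 0 := by simpa using congrArg List.length he
              have hplen : 0 < parts.length := List.length_pos_iff.mpr h3
              omega
            simp [htne, h4]
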